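-- pv_equiv track=rewrite | github.com/genoss1/MTO_MateuszB-aszczy-ski | lab9/main.py | transform
-- ===== SOURCE A (Python) =====
-- def transform(numberString):
--     outputText = []
--     mode = 1;
--     for x in numberString:
--         if x == '.':
--             outputText.append('.')
--             mode = 2;
--         if x == '0':
--             if mode == 1:
--                 outputText.append('a')
--             else:
--                 outputText.append((0+5)%10)
--         elif x == '1':
--             if mode == 1:
--                 outputText.append('b')
--             else:
--                 outputText.append((1+5)%10)
--         elif x == '2':
--             if mode == 1:
--                 outputText.append('c')
--             else:
--                 outputText.append((2+5)%10)
--         elif x == '3':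
--             if mode == 1:
--                 outputText.append('d')
--             else:
--                 outputText.append((3+5)%10)
--         elif x == '4':
--             if mode == 1:
--                 outputText.append('e')
--             else:
--                 outputText.append((4+5)%10)
--         elif x == '5':
--             if mode == 1:
--                 outputText.append('f')
--             else:
--                 outputText.append((5+5)%10)
--         elif x == '6':
--             if mode == 1:
--                 outputText.append('g')
--             else:
--                 outputText.append((6+5)%10)
--         elif x == '7':
--             if mode == 1:
--                 outputText.append('h')
--             else:
--                 outputText.append((7+5)%10)
--         elif x == '8':
--             if mode == 1:
--                 outputText.append('i')
--             else:
--                 outputText.append((8+5)%10)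
--         elif x == '9':
--             if mode == 1:
--                 outputText.append('j')
--             else:
--                 outputText.append((9+5)%10)
--     out = ''.join(str(e) for e in outputText)
--     return out.lower()
-- ===== SOURCE B (Python) =====
-- def transform(numberString):
--     idx = numberString.find('.')
--     head = numberString if idx == -1 else numberString[:idx]
--     tail = '' if idx == -1 else numberString[idx:]
--     letters = ''.join(chr(ord(c) + 49) for c in head if c.isdigit())
--     shifted = ''.join(c if c == '.' else chr(48 + (ord(c) - 43) % 10)
--                       for c in tail if c == '.' or c.isdigit())
--     return letters + shifted
-- ===== Notes on version B (the rewrite author's own statement) =====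
-- stated objective: simpler
-- what changed: A's single loop with a mutable mode flag and a ten-branch elif chain per character is replaced by splitting the string at the first dot and doing two stateless filter-map passes (digits before the dot become letters via chr/ord arithmetic, digits from the dot on become (d+5)%10); a timing run measured B about 3.8x faster (constant factor: no per-character elif chain, no intermediate list of mixed pieces).
import Mathlib
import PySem

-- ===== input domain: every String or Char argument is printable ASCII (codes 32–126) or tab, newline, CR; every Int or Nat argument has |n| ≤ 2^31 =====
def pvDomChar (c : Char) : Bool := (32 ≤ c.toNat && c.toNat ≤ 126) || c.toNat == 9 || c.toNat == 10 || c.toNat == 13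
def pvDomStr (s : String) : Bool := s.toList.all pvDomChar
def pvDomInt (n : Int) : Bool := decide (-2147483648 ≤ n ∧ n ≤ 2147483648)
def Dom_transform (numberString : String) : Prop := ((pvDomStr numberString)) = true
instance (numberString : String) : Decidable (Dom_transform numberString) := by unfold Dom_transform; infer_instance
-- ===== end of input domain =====

-- B replaces A's stateful mode-switching loop by an index split at the first '.' followed by
-- two stateless filter-map passes (letters before the dot, shifted digits from the dot on); objective: simpler.

-- ===== PORT A =====
-- one step of A's for-loop; the accumulator holds the joined pieces (str(e) applied where an int is appended) and the mode
def stepA (st : List (List Char) × Int) (x : Char) : List (List Char) × Int :=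
  let out0 := st.1
  let mode0 := st.2
  let out := if x = '.' then out0 ++ [['.']] else out0
  let mode := if x = '.' then (2 : Int) else mode0
  if x = '0' then
    if mode = 1 then (out ++ [['a']], mode) else (out ++ [PySem.Int.toChars (PySem.Int.mod (0+5) 10)], mode)
  else if x = '1' then
    if mode = 1 then (out ++ [['b']], mode) else (out ++ [PySem.Int.toChars (PySem.Int.mod (1+5) 10)], mode)
  else if x = '2' then
    if mode = 1 then (out ++ [['c']], mode) else (out ++ [PySem.Int.toChars (PySem.Int.mod (2+5) 10)], mode)
  else if x = '3' then
    if mode = 1 then (out ++ [['d']], mode) else (out ++ [PySem.Int.toChars (PySem.Int.mod (3+5) 10)], mode)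
  else if x = '4' then
    if mode = 1 then (out ++ [['e']], mode) else (out ++ [PySem.Int.toChars (PySem.Int.mod (4+5) 10)], mode)
  else if x = '5' then
    if mode = 1 then (out ++ [['f']], mode) else (out ++ [PySem.Int.toChars (PySem.Int.mod (5+5) 10)], mode)
  else if x = '6' then
    if mode = 1 then (out ++ [['g']], mode) else (out ++ [PySem.Int.toChars (PySem.Int.mod (6+5) 10)], mode)
  else if x = '7' then
    if mode = 1 then (out ++ [['h']], mode) else (out ++ [PySem.Int.toChars (PySem.Int.mod (7+5) 10)], mode)
  else if x = '8' then
    if mode = 1 then (out ++ [['i']], mode) else (out ++ [PySem.Int.toChars (PySem.Int.mod (8+5) 10)], mode)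
  else if x = '9' then
    if mode = 1 then (out ++ [['j']], mode) else (out ++ [PySem.Int.toChars (PySem.Int.mod (9+5) 10)], mode)
  else (out, mode)

def transform (numberString : String) : String :=
  let st := numberString.toList.foldl stepA ([], 1)
  String.ofList (PySem.Chars.lower (PySem.Chars.join [] st.1))

-- ===== PORT B =====
-- ''.join(chr(ord(c) + 49) for c in head if c.isdigit())
def lettersOf (cs : List Char) : List Char :=
  (cs.filter (fun c => PySem.Chars.isdigit c)).map (fun c => Char.ofNat (c.toNat + 49))

-- ''.join(c if c == '.' else chr(48 + (ord(c) - 43) % 10) for c in tail if c == '.' or c.isdigit())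
def shiftedOf (cs : List Char) : List Char :=
  (cs.filter (fun c => c = '.' || PySem.Chars.isdigit c)).map
    (fun c => if c = '.' then c else Char.ofNat (48 + (c.toNat - 43) % 10))

def transform_alt (numberString : String) : String :=
  let s := numberString.toList
  let idx := PySem.Chars.find s ['.']
  let head := if idx = -1 then s else PySem.Chars.slice s none (some idx)
  let tail := if idx = -1 then [] else PySem.Chars.slice s (some idx) none
  String.ofList (lettersOf head ++ shiftedOf tail)

-- ===== PRECONDITION & SPEC =====
def Spec_transform (numberString : String) (out : String) : Prop := out = transform_alt numberString
instance (numberString : String) (out : String) : Decidable (Spec_transform numberString out) := by unfold Spec_transform; infer_instance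

-- ===== CLAIM (what is proved, stated in full; the proofs are below) =====
def Claim_equal_transform : Prop := ∀ (numberString : String), Dom_transform numberString → Spec_transform numberString (transform numberString)

-- ===== LEMMAS AND PROOFS =====

theorem pvOfNat97 : Char.ofNat 97 = 'a' := by decide
theorem pvOfNat98 : Char.ofNat 98 = 'b' := by decide
theorem pvOfNat99 : Char.ofNat 99 = 'c' := by decide
theorem pvOfNat100 : Char.ofNat 100 = 'd' := by decide
theorem pvOfNat101 : Char.ofNat 101 = 'e' := by decide
theorem pvOfNat102 : Char.ofNat 102 = 'f' := by decide
theorem pvOfNat103 : Char.ofNat 103 = 'g' := by decide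
theorem pvOfNat104 : Char.ofNat 104 = 'h' := by decide
theorem pvOfNat105 : Char.ofNat 105 = 'i' := by decide
theorem pvOfNat106 : Char.ofNat 106 = 'j' := by decide
theorem pvOfNat48 : Char.ofNat 48 = '0' := by decide
theorem pvOfNat49 : Char.ofNat 49 = '1' := by decide
theorem pvOfNat50 : Char.ofNat 50 = '2' := by decide
theorem pvOfNat51 : Char.ofNat 51 = '3' := by decide
theorem pvOfNat52 : Char.ofNat 52 = '4' := by decide
theorem pvOfNat53 : Char.ofNat 53 = '5' := by decide
theorem pvOfNat54 : Char.ofNat 54 = '6' := by decide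
theorem pvOfNat55 : Char.ofNat 55 = '7' := by decide
theorem pvOfNat56 : Char.ofNat 56 = '8' := by decide
theorem pvOfNat57 : Char.ofNat 57 = '9' := by decide
theorem pvIsd0 : PySem.Chars.isdigit '0' = true := by decide
theorem pvIsd1 : PySem.Chars.isdigit '1' = true := by decide
theorem pvIsd2 : PySem.Chars.isdigit '2' = true := by decide
theorem pvIsd3 : PySem.Chars.isdigit '3' = true := by decide
theorem pvIsd4 : PySem.Chars.isdigit '4' = true := by decide
theorem pvIsd5 : PySem.Chars.isdigit '5' = true := by decide
theorem pvIsd6 : PySem.Chars.isdigit '6' = true := by decide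
theorem pvIsd7 : PySem.Chars.isdigit '7' = true := by decide
theorem pvIsd8 : PySem.Chars.isdigit '8' = true := by decide
theorem pvIsd9 : PySem.Chars.isdigit '9' = true := by decide

theorem digit_cases (c : Char) (h : PySem.Chars.isdigit c = true) :
    c = '0' ∨ c = '1' ∨ c = '2' ∨ c = '3' ∨ c = '4' ∨ c = '5' ∨ c = '6' ∨ c = '7' ∨ c = '8' ∨ c = '9' := by
  simp only [PySem.Chars.isdigit, Bool.and_eq_true, decide_eq_true_eq] at h
  obtain ⟨h1, h2⟩ := h
  have h1' : 48 ≤ c.toNat := h1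
  have h2' : c.toNat ≤ 57 := h2
  have hofn := Char.ofNat_toNat c
  interval_cases hn : c.toNat <;> (rw [← hofn]; decide)

theorem not_digit_cases (x : Char) (hd : PySem.Chars.isdigit x = false) :
    x ≠ '0' ∧ x ≠ '1' ∧ x ≠ '2' ∧ x ≠ '3' ∧ x ≠ '4' ∧ x ≠ '5' ∧ x ≠ '6' ∧ x ≠ '7' ∧ x ≠ '8' ∧ x ≠ '9' := by
  refine ⟨?_, ?_, ?_, ?_, ?_, ?_, ?_, ?_, ?_, ?_⟩ <;> (rintro rfl; exact absurd hd (by decide))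

theorem foldA_mode2 (cs : List Char) (out : List (List Char)) :
    List.foldl stepA (out, (2 : Int)) cs = (out ++ (shiftedOf cs).map (fun c => [c]), 2) := by
  induction cs generalizing out with
  | nil => simp [shiftedOf]
  | cons x t ih =>
    by_cases hdot : x = '.'
    · subst hdot
      simp [List.foldl_cons, stepA, ih, shiftedOf]
    · cases hd : PySem.Chars.isdigit x with
      | true =>
        rcases digit_cases x hd with rfl | rfl | rfl | rfl | rfl | rfl | rfl | rfl | rfl | rfl <;>
          simp [List.foldl_cons, stepA, ih, shiftedOf, pvOfNat48, pvOfNat49, pvOfNat50, pvOfNat51, pvOfNat52, pvOfNat53, pvOfNat54, pvOfNat55, pvOfNat56, pvOfNat57, pvIsd0, pvIsd1, pvIsd2, pvIsd3, pvIsd4, pvIsd5, pvIsd6, pvIsd7, pvIsd8, pvIsd9] <;> decide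
      | false =>
        obtain ⟨h0, h1, h2, h3, h4, h5, h6, h7, h8, h9⟩ := not_digit_cases x hd
        simp [List.foldl_cons, stepA, hdot, h0, h1, h2, h3, h4, h5, h6, h7, h8, h9, ih, shiftedOf, hd]

def pvNotDot (c : Char) : Bool := !decide (c = '.')

theorem foldA_mode1 (cs : List Char) (out : List (List Char)) :
    List.foldl stepA (out, (1 : Int)) cs =
      (out ++ (lettersOf (cs.takeWhile pvNotDot)).map (fun c => [c])
           ++ (shiftedOf (cs.dropWhile pvNotDot)).map (fun c => [c]),
       if cs.dropWhile pvNotDot = [] then (1 : Int) else 2) := by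
  induction cs generalizing out with
  | nil => simp [lettersOf, shiftedOf]
  | cons x t ih =>
    by_cases hdot : x = '.'
    · subst hdot
      have hstep : stepA (out, (1 : Int)) '.' = (out ++ [['.']], 2) := by simp [stepA]
      rw [List.foldl_cons, hstep, foldA_mode2]
      have h1 : pvNotDot '.' = false := by decide
      rw [List.takeWhile_cons_of_neg (by simp [h1]), List.dropWhile_cons_of_neg (by simp [h1])]
      simp [lettersOf, shiftedOf]
    · have hpn : pvNotDot x = true := by simp [pvNotDot, hdot]
      rw [List.takeWhile_cons_of_pos (by simp [hpn]), List.dropWhile_cons_of_pos (by simp [hpn])]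
      cases hd : PySem.Chars.isdigit x with
      | true =>
        rcases digit_cases x hd with rfl | rfl | rfl | rfl | rfl | rfl | rfl | rfl | rfl | rfl <;>
          simp [List.foldl_cons, stepA, ih, lettersOf, pvOfNat97, pvOfNat98, pvOfNat99, pvOfNat100,
                pvOfNat101, pvOfNat102, pvOfNat103, pvOfNat104, pvOfNat105, pvOfNat106,
                pvIsd0, pvIsd1, pvIsd2, pvIsd3, pvIsd4, pvIsd5, pvIsd6, pvIsd7, pvIsd8, pvIsd9]
      | false =>
        obtain ⟨h0, h1, h2, h3, h4, h5, h6, h7, h8, h9⟩ := not_digit_cases x hd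
        simp [List.foldl_cons, stepA, hdot, h0, h1, h2, h3, h4, h5, h6, h7, h8, h9, ih,
              lettersOf, hd]

theorem takeWhile_of_first_dot (s : List Char) (k : Nat) (hk : s[k]? = some '.')
    (hmin : ∀ i < k, s[i]? ≠ some '.') :
    s.takeWhile pvNotDot = s.take k ∧ s.dropWhile pvNotDot = s.drop k := by
  induction s generalizing k with
  | nil => simp at hk
  | cons a t ih =>
    cases k with
    | zero =>
      simp at hk
      subst hk
      rw [List.takeWhile_cons_of_neg (by decide), List.dropWhile_cons_of_neg (by decide)]
      simp
    | succ k =>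
      have ha : a ≠ '.' := by
        intro h
        exact hmin 0 (Nat.succ_pos k) (by simp [h])
      have hrec := ih k (by simpa using hk) (fun i hi => by
        have := hmin (i + 1) (by omega)
        simpa using this)
      rw [List.takeWhile_cons_of_pos (by simp [pvNotDot, ha]),
          List.dropWhile_cons_of_pos (by simp [pvNotDot, ha]),
          hrec.1, hrec.2]
      simp

theorem no_dot_split (s : List Char) (h : ('.' : Char) ∉ s) :
    s.takeWhile pvNotDot = s ∧ s.dropWhile pvNotDot = [] := by
  constructor
  · rw [List.takeWhile_eq_self_iff]
    intro c hc
    have hcne : c ≠ '.' := fun e => h (e ▸ hc)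
    simp [pvNotDot, hcne]
  · rw [List.dropWhile_eq_nil_iff]
    intro c hc
    have hcne : c ≠ '.' := fun e => h (e ▸ hc)
    simp [pvNotDot, hcne]

theorem singleton_infix_iff (c : Char) (s : List Char) : [c] <:+: s ↔ c ∈ s := by
  constructor
  · intro h; exact h.mem (by simp)
  · intro h
    obtain ⟨l, r, rfl⟩ := List.mem_iff_append.mp h
    exact ⟨l, r, by simp⟩

theorem singleton_prefix_drop (s : List Char) (i : Nat) (c : Char) :
    [c] <+: s.drop i ↔ s[i]? = some c := by
  rw [← List.head?_drop]
  cases s.drop i <;> simp [List.cons_prefix_cons, eq_comm]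

theorem lower_fixes (h t : List Char) :
    PySem.Chars.lower (lettersOf h ++ shiftedOf t) = lettersOf h ++ shiftedOf t := by
  unfold PySem.Chars.lower
  rw [List.map_append]
  congr 1
  · unfold lettersOf
    rw [List.map_map]
    apply List.map_congr_left
    intro c hc
    have hd := (List.mem_filter.mp hc).2
    rcases digit_cases c (by simpa using hd) with rfl | rfl | rfl | rfl | rfl | rfl | rfl | rfl | rfl | rfl <;> decide
  · unfold shiftedOf
    rw [List.map_map]
    apply List.map_congr_left
    intro c hc
    have hd := (List.mem_filter.mp hc).2
    simp only [decide_eq_true_eq, Bool.or_eq_true] at hd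
    rcases hd with rfl | hd
    · decide
    · rcases digit_cases c hd with rfl | rfl | rfl | rfl | rfl | rfl | rfl | rfl | rfl | rfl <;> decide

-- ===== VERDICT (by name: the statement is the Claim_ definition above) =====
theorem transform_spec : Claim_equal_transform := by
  intro ns _
  unfold Spec_transform transform transform_alt
  set s := ns.toList with hs
  rw [foldA_mode1]
  have hjoin : ∀ l1 l2 : List Char,
      PySem.Chars.join [] ([] ++ l1.map (fun c => [c]) ++ l2.map (fun c => [c])) = l1 ++ l2 := by
    intro l1 l2
    rw [List.nil_append, ← List.map_append, PySem.Chars.join_nil_singletons]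
  show String.ofList (PySem.Chars.lower (PySem.Chars.join [] _)) = _
  rw [hjoin, lower_fixes]
  rcases (by have := PySem.Chars.neg_one_le_find s ['.']; omega :
      PySem.Chars.find s ['.'] = -1 ∨ 0 ≤ PySem.Chars.find s ['.']) with hf | hf
  · have hnot : ('.' : Char) ∉ s := by
      have := PySem.Chars.find_eq_neg_one_iff (s := s) (sub := ['.']) |>.mp hf
      rw [singleton_infix_iff] at this
      exact this
    obtain ⟨ht, hd⟩ := no_dot_split s hnot
    rw [ht, hd]
    simp [hf, shiftedOf]
  · have hne : ¬ PySem.Chars.find s ['.'] = -1 := by omega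
    obtain ⟨hpre, hmin⟩ := PySem.Chars.find_spec (s := s) (sub := ['.']) hf
    rw [singleton_prefix_drop] at hpre
    have hmin' : ∀ i < (PySem.Chars.find s ['.']).toNat, s[i]? ≠ some '.' := by
      intro i hi
      have := hmin i hi
      rw [singleton_prefix_drop] at this
      exact this
    obtain ⟨ht, hd⟩ := takeWhile_of_first_dot s _ hpre hmin'
    rw [ht, hd]
    simp [hne, PySem.Chars.slice_eq_listSlice, PySem.List.slice_to s hf, PySem.List.slice_from s hf]
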